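-- pv_equiv track=rewrite | github.com/GIftSibusiso/Beginner-exercises | team_allocator.py | jhb_physical_teams
-- ===== SOURCE A (Python) =====
-- def space_maker(string):
--     output = ""
--     for i in string:
--         if i != " ":
--             output += i
--     return output
--
-- def jhb_physical_teams(jhb_physical_students):
--     '''
--     from the list of jhb_physical_students create list of 4 students per team, and add them to
--     one big list
--     '''
--     jhb_physical_teams = []
--     team = []
--
--     for students in jhb_physical_students:
--         if len(team) == 4:
--             jhb_physical_teams.append(team)
--             team = []
--         team.append(space_maker(students).lower())
--
--     if len(team) > 0:
--         jhb_physical_teams.append(team)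
--
--     return jhb_physical_teams
-- ===== SOURCE B (Python) =====
-- def jhb_physical_teams(jhb_physical_students):
--     cleaned = [s.replace(' ', '').lower() for s in jhb_physical_students]
--     return [cleaned[i:i+4] for i in range(0, len(cleaned), 4)]
-- ===== Notes on version B (the rewrite author's own statement) =====
-- stated objective: simpler
-- what changed: Replaces the accumulator loop that grows a team and flushes it on reaching size 4 (plus the per-character space_maker helper) with a cleaned-list comprehension followed by stride-4 index slicing.
import Mathlib
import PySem

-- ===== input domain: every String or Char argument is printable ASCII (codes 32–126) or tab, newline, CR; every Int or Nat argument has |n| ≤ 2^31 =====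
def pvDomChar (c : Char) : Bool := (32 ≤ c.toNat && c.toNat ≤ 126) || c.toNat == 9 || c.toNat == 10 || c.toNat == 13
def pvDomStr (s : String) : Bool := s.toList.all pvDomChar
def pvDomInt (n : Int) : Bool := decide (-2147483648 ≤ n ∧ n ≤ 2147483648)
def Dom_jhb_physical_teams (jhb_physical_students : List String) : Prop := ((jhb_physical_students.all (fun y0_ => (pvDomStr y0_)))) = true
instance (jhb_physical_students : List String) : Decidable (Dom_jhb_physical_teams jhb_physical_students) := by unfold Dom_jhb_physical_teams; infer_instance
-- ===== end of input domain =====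

-- B replaces A's grow-and-flush accumulator loop (and per-character space_maker) by a cleaned
-- map followed by stride-4 slice chunking; same return value, simpler decomposition (not faster).

-- ===== PORT A =====
def space_maker (string : String) : String :=
  String.ofList (string.toList.foldl (fun output i => if i != ' ' then output ++ [i] else output) [])

def jhb_physical_teams (jhb_physical_students : List String) : List (List String) :=
  let st := jhb_physical_students.foldl
    (fun (st : List (List String) × List String) students =>
      let st' := if st.2.length = 4 then (st.1 ++ [st.2], ([] : List String)) else st
      (st'.1, st'.2 ++ [PySem.Str.lower (space_maker students)]))
    ([], [])
  if st.2.length > 0 then st.1 ++ [st.2] else st.1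

-- ===== PORT B =====
def jhb_physical_teams_alt (jhb_physical_students : List String) : List (List String) :=
  let cleaned := jhb_physical_students.map (fun s => PySem.Str.lower (PySem.Str.replace s " " ""))
  (PySem.List.pyRange 0 (cleaned.length : Int) 4).map
    (fun i => PySem.List.slice cleaned (some i) (some (i + 4)))

-- ===== PRECONDITION & SPEC =====
def Spec_jhb_physical_teams (jhb_physical_students : List String) (out : List (List String)) : Prop := out = jhb_physical_teams_alt jhb_physical_students
instance (jhb_physical_students : List String) (out : List (List String)) : Decidable (Spec_jhb_physical_teams jhb_physical_students out) := by unfold Spec_jhb_physical_teams; infer_instance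

-- ===== CLAIM (what is proved, stated in full; the proofs are below) =====
def Claim_equal_jhb_physical_teams : Prop := ∀ (jhb_physical_students : List String), Dom_jhb_physical_teams jhb_physical_students → Spec_jhb_physical_teams jhb_physical_students (jhb_physical_teams jhb_physical_students)

-- ===== LEMMAS AND PROOFS =====

-- proof-side helper: chunking a list into fours, the common normal form of both ports
def chunk4 (cs : List String) : List (List String) :=
  if h : cs = [] then [] else cs.take 4 :: chunk4 (cs.drop 4)
termination_by cs.length
decreasing_by
  simp only [List.length_drop]
  exact Nat.sub_lt (List.length_pos_iff.mpr h) (by norm_num)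

-- A's per-character space stripping is a filter
lemma space_maker_toList (s : String) :
    (space_maker s).toList = s.toList.filter (· != ' ') := by
  simp only [space_maker, PySem.List.foldl_append_if, pysem]
  simp

-- B's replace(' ','') is the same filter: unroll the fuelled go of Chars.replace
lemma replace_go_space : ∀ (l : List Char) (fuel : Nat) (acc : List Char), l.length ≤ fuel →
    PySem.Chars.replace.go [' '] [] fuel l acc = acc.reverse ++ l.filter (· != ' ') := by
  intro l
  induction l with
  | nil =>
      intro fuel acc _
      cases fuel <;> simp [PySem.Chars.replace.go]
  | cons c t ih =>
      intro fuel acc hle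
      cases fuel with
      | zero => simp at hle
      | succ f =>
        by_cases hc : c = ' '
        · subst hc
          simp only [PySem.Chars.replace.go, List.isPrefixOf, BEq.rfl, Bool.true_and,
            if_true, List.length_cons, List.length_nil, List.drop_succ_cons,
            List.drop_zero, List.reverse_nil, List.nil_append]
          rw [ih f acc (by simpa using Nat.le_of_succ_le_succ hle)]
          simp
        · have hpre : ([' '].isPrefixOf (c :: t)) = false := by
            simp [List.isPrefixOf]
            exact fun h => hc h.symm
          simp only [PySem.Chars.replace.go, hpre, Bool.false_eq_true, if_false]
          rw [ih f (c :: acc) (by simpa using Nat.le_of_succ_le_succ hle)]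
          simp [hc]

lemma chars_replace_space (cs : List Char) :
    PySem.Chars.replace cs [' '] [] = cs.filter (· != ' ') := by
  rw [PySem.Chars.replace]
  simp only [List.isEmpty_cons, if_false, Bool.false_eq_true]
  exact replace_go_space cs cs.length [] le_rfl

-- hence the two cleaners agree
lemma clean_eq (s : String) :
    PySem.Str.lower (space_maker s) = PySem.Str.lower (PySem.Str.replace s " " "") := by
  simp [PySem.Str.lower, space_maker_toList, chars_replace_space]

-- B: the pyRange/slice comprehension computes drop/take chunks over range
lemma alt_map_slice (cs : List String) :
    (PySem.List.pyRange 0 (cs.length : Int) 4).map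
      (fun i => PySem.List.slice cs (some i) (some (i + 4)))
    = (List.range ((cs.length + 3) / 4)).map (fun k => (cs.drop (4 * k)).take 4) := by
  rw [PySem.List.pyRange_of_pos 0 ((cs.length : Int)) (by norm_num : (0:Int) < 4)]
  have hcount : (if (0:Int) < (cs.length : Int) then (((cs.length : Int) - 0 + 4 - 1) / 4).toNat else 0)
      = (cs.length + 3) / 4 := by
    split_ifs with h
    · have : ((cs.length : Int) - 0 + 4 - 1) = ((cs.length + 3 : Nat) : Int) := by push_cast; ring
      rw [this]
      omega
    · have : cs.length = 0 := by omega
      simp [this]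
  rw [hcount, List.map_map]
  apply List.map_congr_left
  intro k _
  have h0 : (0 : Int) + 4 * (k : Int) = ((4 * k : Nat) : Int) := by push_cast; ring
  have h1 : ((4 * k : Nat) : Int) + 4 = ((4 * k + 4 : Nat) : Int) := by push_cast; ring
  simp only [Function.comp]
  rw [h0, h1, PySem.List.slice_natCast]
  congr 1
  omega

-- drop/take chunks over range are chunk4
lemma range_chunk : ∀ (n : Nat) (cs : List String), cs.length ≤ n →
    (List.range ((cs.length + 3) / 4)).map (fun k => (cs.drop (4 * k)).take 4) = chunk4 cs := by
  intro n
  induction n with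
  | zero =>
      intro cs h
      have : cs = [] := List.length_eq_zero_iff.mp (Nat.le_zero.mp h)
      subst this
      simp [chunk4]
  | succ n ih =>
      intro cs h
      by_cases hnil : cs = []
      · subst hnil; simp [chunk4]
      · have hpos : 0 < cs.length := List.length_pos_iff.mpr hnil
        obtain ⟨q, hq⟩ : ∃ q, (cs.length + 3) / 4 = q + 1 :=
          ⟨(cs.length + 3) / 4 - 1, by omega⟩
        rw [hq, List.range_succ_eq_map, List.map_cons, List.map_map]
        have hhead : (cs.drop (4 * 0)).take 4 = cs.take 4 := by simp
        have htail : (List.range q).map ((fun k => (cs.drop (4 * k)).take 4) ∘ Nat.succ)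
            = (List.range q).map (fun k => ((cs.drop 4).drop (4 * k)).take 4) := by
          apply List.map_congr_left
          intro k _
          simp only [Function.comp, List.drop_drop]
          congr 2
          omega
        rw [hhead, htail]
        have hq' : ((cs.drop 4).length + 3) / 4 = q := by
          simp only [List.length_drop]
          omega
        rw [← hq', ih (cs.drop 4) (by simp; omega)]
        conv_rhs => rw [chunk4]
        rw [dif_neg hnil]

-- A: the grow-and-flush loop, factored for the proofs (definitionally A's foldl body and epilogue)
def loopStep (st : List (List String) × List String) (students : String) : List (List String) × List String :=
  let st' := if st.2.length = 4 then (st.1 ++ [st.2], ([] : List String)) else st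
  (st'.1, st'.2 ++ [PySem.Str.lower (space_maker students)])

def finishA (st : List (List String) × List String) : List (List String) :=
  if st.2.length > 0 then st.1 ++ [st.2] else st.1

lemma portA_eq (l : List String) : jhb_physical_teams l = finishA (l.foldl loopStep ([], [])) := rfl

lemma chunk4_singleton (team : List String) (hnil : team ≠ []) (hle : team.length ≤ 4) :
    chunk4 team = [team] := by
  rw [chunk4, dif_neg hnil, List.take_of_length_le hle, List.drop_eq_nil_of_le hle, chunk4]
  simp

lemma chunk4_cons_of_four (team : List String) (x : List String) (h4 : team.length = 4) :
    chunk4 (team ++ x) = team :: chunk4 x := by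
  rw [chunk4]
  have hne : team ++ x ≠ [] := by
    intro h
    have := congrArg List.length h
    simp [h4] at this
  rw [dif_neg hne, ← h4, List.take_left, List.drop_left]

lemma loopA_eq : ∀ (l : List String) (teams : List (List String)) (team : List String),
    0 < team.length → team.length ≤ 4 →
    finishA (l.foldl loopStep (teams, team))
    = teams ++ chunk4 (team ++ l.map (fun s => PySem.Str.lower (space_maker s))) := by
  intro l
  induction l with
  | nil =>
      intro teams team hpos hle
      have hnil : team ≠ [] := by intro h; subst h; simp at hpos
      simp only [List.foldl_nil, List.map_nil, List.append_nil, finishA, if_pos hpos,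
        chunk4_singleton team hnil hle]
  | cons s rest ih =>
      intro teams team hpos hle
      rw [List.foldl_cons]
      by_cases h4 : team.length = 4
      · have hstep : loopStep (teams, team) s
            = (teams ++ [team], [PySem.Str.lower (space_maker s)]) := by
          simp [loopStep, h4]
        rw [hstep, ih (teams ++ [team]) [PySem.Str.lower (space_maker s)] (by simp) (by simp)]
        rw [List.map_cons, chunk4_cons_of_four team _ h4]
        simp
      · have hstep : loopStep (teams, team) s
            = (teams, team ++ [PySem.Str.lower (space_maker s)]) := by
          simp [loopStep, h4]
        rw [hstep, ih teams (team ++ [PySem.Str.lower (space_maker s)]) (by simp) (by simp; omega)]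
        simp

-- ===== VERDICT (by name: the statement is the Claim_ definition above) =====
theorem jhb_physical_teams_spec : Claim_equal_jhb_physical_teams := by
  intro l _hdom
  show jhb_physical_teams l = jhb_physical_teams_alt l
  have hB : jhb_physical_teams_alt l
      = chunk4 (l.map (fun s => PySem.Str.lower (PySem.Str.replace s " " ""))) := by
    show (PySem.List.pyRange 0 _ 4).map _ = _
    rw [alt_map_slice, range_chunk (l.map _).length _ le_rfl]
  have hclean : l.map (fun s => PySem.Str.lower (space_maker s))
      = l.map (fun s => PySem.Str.lower (PySem.Str.replace s " " "")) := by
    apply List.map_congr_left; intro s _; exact clean_eq s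
  rw [hB, ← hclean, portA_eq]
  cases l with
  | nil => simp [finishA, chunk4]
  | cons s rest =>
      rw [List.foldl_cons]
      have hstep : loopStep ([], []) s = ([], [PySem.Str.lower (space_maker s)]) := by
        simp [loopStep]
      rw [hstep, loopA_eq rest [] [PySem.Str.lower (space_maker s)] (by simp) (by simp)]
      simp
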